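-- pv_equiv track=rewrite | github.com/raeez/chiral-bar-cobar | compute/lib/bar_cohomology_w4_explicit_engine.py | w3_vacuum_dims
-- ===== SOURCE A (Python) =====
-- from typing import Any, Dict, List, Optional, Tuple
--
-- def w3_vacuum_dims(max_weight: int) -> Dict[int, int]:
--     """W_3 vacuum module dimensions (prod of parts>=2 and parts>=3)."""
--     c_L = [0] * (max_weight + 1)
--     c_L[0] = 1
--     for n in range(2, max_weight + 1):
--         for k in range(n, max_weight + 1):
--             c_L[k] += c_L[k - n]
--
--     c_W = [0] * (max_weight + 1)
--     c_W[0] = 1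
--     for m in range(3, max_weight + 1):
--         for k in range(m, max_weight + 1):
--             c_W[k] += c_W[k - m]
--
--     product = [0] * (max_weight + 1)
--     for i in range(max_weight + 1):
--         for j in range(max_weight + 1 - i):
--             product[i + j] += c_L[i] * c_W[j]
--
--     return {h: product[h] for h in range(max_weight + 1)}
-- ===== SOURCE B (Python) =====
-- def w3_vacuum_dims(max_weight: int):
--     """W_3 vacuum module dimensions, built functionally.
--
--     The answer is the coefficient list of 1/((1-x^2) * prod_{m=3}^{W} (1-x^m)^2)
--     truncated at W.  Build the explicit factor multiset [2, 3, 3, 4, 4, ...] and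
--     fold each geometric factor 1/(1-x^m) over the coefficient list, rebuilding a
--     fresh list with g[k] = f[k] + g[k-m] -- no second table and no convolution
--     of two tables.
--     """
--     W = max_weight
--     coeffs = [1 if k == 0 else 0 for k in range(W + 1)]
--     factors = [2] + [m for m in range(3, W + 1) for _ in range(2)]
--     for m in factors:
--         new = []
--         for k in range(W + 1):
--             new.append(coeffs[k] + (new[k - m] if k >= m else 0))
--         coeffs = new
--     return {h: coeffs[h] for h in range(W + 1)}
-- ===== Notes on version B (the rewrite author's own statement) =====
-- stated objective: alternative
-- what changed: A builds two in-place partition DP tables (parts>=2 and parts>=3) and combines them with an O(W^2) convolution double loop; B instead builds the explicit factor multiset [2,3,3,4,4,...] and folds each geometric factor over one coefficient list, rebuilding a fresh list with g[k]=f[k]+g[k-m] -- no second table, no in-place updates and no convolution pass.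
import Mathlib
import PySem

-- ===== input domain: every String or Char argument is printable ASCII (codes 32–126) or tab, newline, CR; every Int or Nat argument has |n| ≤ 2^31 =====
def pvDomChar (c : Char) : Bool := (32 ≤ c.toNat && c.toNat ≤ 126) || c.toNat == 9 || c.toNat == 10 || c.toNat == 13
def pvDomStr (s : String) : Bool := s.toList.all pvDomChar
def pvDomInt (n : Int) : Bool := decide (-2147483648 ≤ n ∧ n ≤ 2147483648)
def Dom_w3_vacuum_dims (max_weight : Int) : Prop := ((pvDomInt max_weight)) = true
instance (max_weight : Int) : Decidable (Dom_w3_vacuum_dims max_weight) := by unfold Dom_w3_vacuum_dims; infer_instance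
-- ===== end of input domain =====

-- B replaces A's two in-place partition tables plus an explicit convolution by a
-- functional fold of the factor multiset [2,3,3,4,4,…] over one coefficient
-- list, rebuilding it with the closed sum g[k] = Σ_j f[k-j·m] (objective:
-- alternative — no second table, no in-place updates, no convolution pass).

-- ===== PORT A =====
def w3_vacuum_dims (max_weight : Int) : List (Int × Int) :=
  let cL0 : List Int := PySem.List.pySetD (List.replicate (max_weight + 1).toNat 0) 0 1
  let cL : List Int := (PySem.List.pyRange 2 (max_weight + 1)).foldl (fun v n =>
      (PySem.List.pyRange n (max_weight + 1)).foldl (fun w k =>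
        PySem.List.pySetD w k (PySem.List.pyGetD w k 0 + PySem.List.pyGetD w (k - n) 0)) v) cL0
  let cW0 : List Int := PySem.List.pySetD (List.replicate (max_weight + 1).toNat 0) 0 1
  let cW : List Int := (PySem.List.pyRange 3 (max_weight + 1)).foldl (fun v m =>
      (PySem.List.pyRange m (max_weight + 1)).foldl (fun w k =>
        PySem.List.pySetD w k (PySem.List.pyGetD w k 0 + PySem.List.pyGetD w (k - m) 0)) v) cW0
  let product : List Int := (PySem.List.pyRange 0 (max_weight + 1)).foldl (fun v i =>
      (PySem.List.pyRange 0 (max_weight + 1 - i)).foldl (fun w j =>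
        PySem.List.pySetD w (i + j) (PySem.List.pyGetD w (i + j) 0 +
          PySem.List.pyGetD cL i 0 * PySem.List.pyGetD cW j 0)) v)
      (List.replicate (max_weight + 1).toNat 0)
  (PySem.List.pyRange 0 (max_weight + 1)).map (fun h => (h, PySem.List.pyGetD product h 0))

-- ===== PORT B =====
def w3_vacuum_dims_alt (max_weight : Int) : List (Int × Int) :=
  let W := max_weight
  let coeffs0 : List Int := (PySem.List.pyRange 0 (W + 1)).map (fun k => if k == 0 then 1 else 0)
  let factors : List Int :=
    [2] ++ (PySem.List.pyRange 3 (W + 1)).flatMap (fun m => (PySem.List.pyRange 0 2).map (fun _ => m))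
  let coeffs : List Int := factors.foldl (fun c m =>
      (PySem.List.pyRange 0 (W + 1)).foldl (fun new k =>
        new ++ [PySem.List.pyGetD c k 0 +
          (if m ≤ k then PySem.List.pyGetD new (k - m) 0 else 0)]) []) coeffs0
  (PySem.List.pyRange 0 (W + 1)).map (fun h => (h, PySem.List.pyGetD coeffs h 0))

-- ===== PRECONDITION & SPEC =====
-- Pre_: on max_weight < 0 the Python A builds an empty list and 'c_L[0] = 1'
-- raises IndexError; those inputs are excluded.
def Pre_w3_vacuum_dims (max_weight : Int) : Prop := 0 ≤ max_weight
instance (max_weight : Int) : Decidable (Pre_w3_vacuum_dims max_weight) := by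
  unfold Pre_w3_vacuum_dims; infer_instance
def pvWitness_w3_vacuum_dims : Int := 6

def Spec_w3_vacuum_dims (max_weight : Int) (out : List (Int × Int)) : Prop := out = w3_vacuum_dims_alt max_weight
instance (max_weight : Int) (out : List (Int × Int)) : Decidable (Spec_w3_vacuum_dims max_weight out) := by unfold Spec_w3_vacuum_dims; infer_instance

-- ===== CLAIM (what is proved, stated in full; the proofs are below) =====
def Claim_equal_w3_vacuum_dims : Prop := ∀ (max_weight : Int), Dom_w3_vacuum_dims max_weight → Pre_w3_vacuum_dims max_weight → Spec_w3_vacuum_dims max_weight (w3_vacuum_dims max_weight)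
-- ===== LEMMAS AND PROOFS =====

-- coefficient function after multiplying a series by 1/(1-x^n)
def pvLf (n : Nat) (f : Nat → Int) (k : Nat) : Int :=
  if h : 0 < n ∧ n ≤ k then f k + pvLf n f (k - n) else f k
termination_by k
decreasing_by omega

theorem pvLf_low {n k : Nat} (f : Nat → Int) (h : ¬ (0 < n ∧ n ≤ k)) : pvLf n f k = f k := by
  rw [pvLf]; simp [h]

theorem pvLf_high {n k : Nat} (f : Nat → Int) (h : 0 < n ∧ n ≤ k) :
    pvLf n f k = f k + pvLf n f (k - n) := by
  rw [pvLf]; simp [h]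

-- the unit coefficient function (series 1)
def pvE : Nat → Int := fun k => if k = 0 then 1 else 0

theorem pvE_mk : PowerSeries.mk pvE = (1 : PowerSeries ℤ) := by
  ext k
  simp [pvE, PowerSeries.coeff_one]

theorem pvLf_char (n : Nat) (hn : 0 < n) (f : Nat → Int) :
    PowerSeries.mk (pvLf n f) * (1 - PowerSeries.X ^ n) = PowerSeries.mk f := by
  ext k
  simp only [mul_sub, mul_one, map_sub, PowerSeries.coeff_mul_X_pow', PowerSeries.coeff_mk]
  by_cases hk : n ≤ k
  · rw [if_pos hk, pvLf_high f ⟨hn, hk⟩]; ring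
  · rw [if_neg hk, pvLf_low f (by omega), sub_zero]

theorem pv_one_sub_X_pow_ne_zero (n : Nat) (hn : 0 < n) :
    (1 - PowerSeries.X ^ n : PowerSeries ℤ) ≠ 0 := by
  intro h
  have h0 : (PowerSeries.coeff (R := ℤ) 0) (1 - PowerSeries.X ^ n) = 1 := by
    rw [map_sub, PowerSeries.coeff_one, PowerSeries.coeff_X_pow, if_pos rfl,
      if_neg (by omega : ¬ 0 = n)]
    ring
  rw [h] at h0; simp at h0

theorem pv_applyI_char (l : List Int) (hl : ∀ n ∈ l, 1 ≤ n) (f : Nat → Int) :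
    PowerSeries.mk (l.foldl (fun g n => pvLf n.toNat g) f) *
      (l.map (fun n => 1 - PowerSeries.X ^ n.toNat : Int → PowerSeries ℤ)).prod
      = PowerSeries.mk f := by
  induction l generalizing f with
  | nil => simp
  | cons a t ih =>
      have ha : 1 ≤ a := hl a (by simp)
      have ht : ∀ n ∈ t, 1 ≤ n := fun n hn => hl n (by simp [hn])
      simp only [List.foldl_cons, List.map_cons, List.prod_cons]
      rw [mul_left_comm, ih ht, mul_comm, pvLf_char a.toNat (by omega) f]

theorem pv_applyD_char (l : List Int) (hl : ∀ n ∈ l, 1 ≤ n) (f : Nat → Int) :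
    PowerSeries.mk (l.foldl (fun g n => pvLf n.toNat (pvLf n.toNat g)) f) *
      (l.map (fun n => (1 - PowerSeries.X ^ n.toNat) * (1 - PowerSeries.X ^ n.toNat) :
        Int → PowerSeries ℤ)).prod
      = PowerSeries.mk f := by
  induction l generalizing f with
  | nil => simp
  | cons a t ih =>
      have ha : 1 ≤ a := hl a (by simp)
      have ht : ∀ n ∈ t, 1 ≤ n := fun n hn => hl n (by simp [hn])
      simp only [List.foldl_cons, List.map_cons, List.prod_cons]
      rw [mul_left_comm, ih ht, mul_comm, ← mul_assoc,
        pvLf_char a.toNat (by omega) (pvLf a.toNat f), pvLf_char a.toNat (by omega) f]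

-- semantic main theorem: A's product of two tables has the same coefficients as
-- the single table with part 2 applied once and parts 3..m-1 applied twice
theorem pv_sem_main (m : Int) (hm : 3 ≤ m) :
    (fun h => (PowerSeries.coeff (R := ℤ) h)
        (PowerSeries.mk ((PySem.List.pyRange 2 m).foldl (fun g n => pvLf n.toNat g) pvE) *
         PowerSeries.mk ((PySem.List.pyRange 3 m).foldl (fun g n => pvLf n.toNat g) pvE)))
    = (PySem.List.pyRange 3 m).foldl (fun g n => pvLf n.toNat (pvLf n.toNat g)) (pvLf 2 pvE) := by
  have hl2 : ∀ n ∈ PySem.List.pyRange 2 m, (1 : Int) ≤ n := by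
    intro n hn; rw [PySem.List.mem_pyRange_one] at hn; omega
  have hl3 : ∀ n ∈ PySem.List.pyRange 3 m, (1 : Int) ≤ n := by
    intro n hn; rw [PySem.List.mem_pyRange_one] at hn; omega
  have hA2 := pv_applyI_char (PySem.List.pyRange 2 m) hl2 pvE
  have hA3 := pv_applyI_char (PySem.List.pyRange 3 m) hl3 pvE
  have hB := pv_applyD_char (PySem.List.pyRange 3 m) hl3 (pvLf 2 pvE)
  rw [pvE_mk] at hA2 hA3
  set P3 : PowerSeries ℤ :=
    ((PySem.List.pyRange 3 m).map (fun n => 1 - PowerSeries.X ^ n.toNat : Int → PowerSeries ℤ)).prod with hP3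
  have hQd : ((PySem.List.pyRange 3 m).map
      (fun n => (1 - PowerSeries.X ^ n.toNat) * (1 - PowerSeries.X ^ n.toNat) :
        Int → PowerSeries ℤ)).prod = P3 * P3 := by
    rw [hP3, ← List.prod_map_mul]
  have hcons : PySem.List.pyRange 2 m = 2 :: PySem.List.pyRange 3 m := by
    rw [PySem.List.pyRange_one_cons (by omega : (2 : Int) < m)]
    norm_num
  have hP2 : ((PySem.List.pyRange 2 m).map
      (fun n => 1 - PowerSeries.X ^ n.toNat : Int → PowerSeries ℤ)).prod
      = (1 - PowerSeries.X ^ 2) * P3 := by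
    rw [hcons, List.map_cons, List.prod_cons, hP3]
    rfl
  rw [hP2] at hA2
  have hchar2 : PowerSeries.mk (pvLf 2 pvE) * (1 - PowerSeries.X ^ 2) = 1 := by
    rw [pvLf_char 2 (by omega) pvE, pvE_mk]
  set Q : PowerSeries ℤ := (1 - PowerSeries.X ^ 2) * (P3 * P3) with hQ
  have hQne : Q ≠ 0 := by
    have h3 : P3 ≠ 0 := by
      rw [hP3]
      apply List.prod_ne_zero
      intro h0
      rw [List.mem_map] at h0
      obtain ⟨n, hn, hzero⟩ := h0
      exact pv_one_sub_X_pow_ne_zero n.toNat (by have := hl3 n hn; omega) hzero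
    exact mul_ne_zero (pv_one_sub_X_pow_ne_zero 2 (by omega)) (mul_ne_zero h3 h3)
  have hAside : (PowerSeries.mk ((PySem.List.pyRange 2 m).foldl (fun g n => pvLf n.toNat g) pvE) *
      PowerSeries.mk ((PySem.List.pyRange 3 m).foldl (fun g n => pvLf n.toNat g) pvE)) * Q = 1 := by
    have : (PowerSeries.mk ((PySem.List.pyRange 2 m).foldl (fun g n => pvLf n.toNat g) pvE) *
        PowerSeries.mk ((PySem.List.pyRange 3 m).foldl (fun g n => pvLf n.toNat g) pvE)) * Q
        = (PowerSeries.mk ((PySem.List.pyRange 2 m).foldl (fun g n => pvLf n.toNat g) pvE) *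
            ((1 - PowerSeries.X ^ 2) * P3)) *
          (PowerSeries.mk ((PySem.List.pyRange 3 m).foldl (fun g n => pvLf n.toNat g) pvE) * P3) := by
      rw [hQ]; ring
    rw [this, hA2, hA3, mul_one]
  have hBside : PowerSeries.mk ((PySem.List.pyRange 3 m).foldl
      (fun g n => pvLf n.toNat (pvLf n.toNat g)) (pvLf 2 pvE)) * Q = 1 := by
    have : PowerSeries.mk ((PySem.List.pyRange 3 m).foldl
        (fun g n => pvLf n.toNat (pvLf n.toNat g)) (pvLf 2 pvE)) * Q
        = (PowerSeries.mk ((PySem.List.pyRange 3 m).foldl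
            (fun g n => pvLf n.toNat (pvLf n.toNat g)) (pvLf 2 pvE)) * (P3 * P3)) *
          (1 - PowerSeries.X ^ 2) := by
      rw [hQ]; ring
    rw [this, ← hQd, hB, hchar2]
  have hmk : PowerSeries.mk ((PySem.List.pyRange 2 m).foldl (fun g n => pvLf n.toNat g) pvE) *
      PowerSeries.mk ((PySem.List.pyRange 3 m).foldl (fun g n => pvLf n.toNat g) pvE)
      = PowerSeries.mk ((PySem.List.pyRange 3 m).foldl
          (fun g n => pvLf n.toNat (pvLf n.toNat g)) (pvLf 2 pvE)) :=
    mul_right_cancel₀ hQne (by rw [hAside, hBside])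
  funext h
  rw [hmk, PowerSeries.coeff_mk]

-- ===== list ↔ function bridges (A side) =====

theorem pv_map_range_set (M c : Nat) (hc : c < M) (g : Nat → Int) (v : Int) :
    ((List.range M).map g).set c v
      = (List.range M).map (fun k => if k = c then v else g k) := by
  apply List.ext_getElem
  · simp
  · intro i h1 h2
    simp only [List.getElem_set, List.getElem_map, List.getElem_range]
    by_cases h : c = i
    · subst h; simp
    · rw [if_neg h, if_neg (by omega)]

theorem pv_getD_map_range_int (M : Nat) (g : Nat → Int) (i : Int) (h0 : 0 ≤ i)
    (h1 : i < (M : Int)) :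
    PySem.List.pyGetD ((List.range M).map g) i 0 = g i.toNat := by
  rw [PySem.List.pyGetD_of_nonneg _ _ h0, PySem.List.getD_map_range g M i.toNat 0 (by omega)]

theorem pv_inner_aux (M : Nat) (n : Int) (hn : 1 ≤ n) (f : Nat → Int) :
    ∀ t : Nat, n + (t : Int) ≤ (M : Int) →
    (PySem.List.pyRange n (n + (t : Int))).foldl (fun w k =>
        PySem.List.pySetD w k (PySem.List.pyGetD w k 0 + PySem.List.pyGetD w (k - n) 0))
      ((List.range M).map f)
    = (List.range M).map (fun k : Nat =>
        if (k : Int) < n + (t : Int) then pvLf n.toNat f k else f k) := by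
  intro t
  induction t with
  | zero =>
      intro _
      rw [Nat.cast_zero, add_zero, PySem.List.pyRange_one_eq_nil (le_refl n), List.foldl_nil]
      apply List.map_congr_left
      intro k _
      split_ifs with h
      · rw [pvLf_low f (by omega)]
      · rfl
  | succ t ih =>
      intro hb
      have hb' : n + (t : Int) ≤ (M : Int) := by push_cast at hb ⊢; omega
      have hstep : n + ((t + 1 : Nat) : Int) = (n + (t : Int)) + 1 := by push_cast; ring
      rw [hstep, PySem.List.pyRange_one_succ_right (by omega), List.foldl_append, ih hb',
        List.foldl_cons, List.foldl_nil]
      have hget1 : PySem.List.pyGetD ((List.range M).map (fun k : Nat =>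
          if (k : Int) < n + (t : Int) then pvLf n.toNat f k else f k)) (n + (t : Int)) 0
          = f (n + (t : Int)).toNat := by
        rw [pv_getD_map_range_int M _ _ (by omega) (by omega)]
        rw [if_neg (by omega)]
      have hget2 : PySem.List.pyGetD ((List.range M).map (fun k : Nat =>
          if (k : Int) < n + (t : Int) then pvLf n.toNat f k else f k)) (n + (t : Int) - n) 0
          = pvLf n.toNat f t := by
        have : n + (t : Int) - n = (t : Int) := by ring
        rw [this, pv_getD_map_range_int M _ _ (by omega) (by omega)]
        simp only [Int.toNat_natCast]
        rw [if_pos (by omega)]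
      rw [hget1, hget2, PySem.List.pySetD_of_nonneg _ _ (by omega),
        pv_map_range_set M (n + (t : Int)).toNat (by omega)]
      apply List.map_congr_left
      intro k hk
      have hkM : k < M := List.mem_range.mp hk
      by_cases hke : k = (n + (t : Int)).toNat
      · have h2 : (n + (t : Int)).toNat = n.toNat + t := by omega
        rw [if_pos hke, if_pos (by omega), hke, h2,
          pvLf_high (n := n.toNat) (k := n.toNat + t) f ⟨by omega, by omega⟩,
          Nat.add_sub_cancel_left]
      · rw [if_neg hke]
        by_cases hlt : (k : Int) < n + (t : Int)
        · rw [if_pos hlt, if_pos (by omega)]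
        · rw [if_neg hlt, if_neg (by omega)]

theorem pv_inner_bridge (M : Nat) (n : Int) (hn : 1 ≤ n) (f : Nat → Int) :
    (PySem.List.pyRange n (M : Int)).foldl (fun w k =>
        PySem.List.pySetD w k (PySem.List.pyGetD w k 0 + PySem.List.pyGetD w (k - n) 0))
      ((List.range M).map f)
    = (List.range M).map (pvLf n.toNat f) := by
  by_cases hnM : n ≤ (M : Int)
  · have h1 : (M : Int) = n + (((M : Int) - n).toNat : Int) := by omega
    rw [h1, pv_inner_aux M n hn f ((M : Int) - n).toNat (by omega)]
    apply List.map_congr_left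
    intro k hk
    rw [if_pos (by have := List.mem_range.mp hk; omega)]
  · rw [PySem.List.pyRange_one_eq_nil (by omega), List.foldl_nil]
    apply List.map_congr_left
    intro k hk
    have := List.mem_range.mp hk
    rw [pvLf_low f (by omega)]

theorem pv_outer_bridge (M : Nat) (l : List Int) (hl : ∀ n ∈ l, 1 ≤ n) (f : Nat → Int) :
    l.foldl (fun v n => (PySem.List.pyRange n (M : Int)).foldl (fun w k =>
        PySem.List.pySetD w k (PySem.List.pyGetD w k 0 + PySem.List.pyGetD w (k - n) 0)) v)
      ((List.range M).map f)
    = (List.range M).map (l.foldl (fun g n => pvLf n.toNat g) f) := by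
  induction l generalizing f with
  | nil => rfl
  | cons a t ih =>
      simp only [List.foldl_cons]
      rw [pv_inner_bridge M a (hl a (by simp)) f, ih (fun n hn => hl n (by simp [hn]))]

theorem pv_conv_inner (M : Nat) (i : Int) (hi : 0 ≤ i) (val : Int → Int) (g : Nat → Int) :
    (PySem.List.pyRange 0 ((M : Int) - i)).foldl (fun w j =>
        PySem.List.pySetD w (i + j) (PySem.List.pyGetD w (i + j) 0 + val j))
      ((List.range M).map g)
    = (List.range M).map (fun h : Nat => if i ≤ (h : Int) then g h + val ((h : Int) - i) else g h) := by
  have aux : ∀ t : Nat, (t : Int) ≤ (M : Int) - i →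
      (PySem.List.pyRange 0 (t : Int)).foldl (fun w j =>
          PySem.List.pySetD w (i + j) (PySem.List.pyGetD w (i + j) 0 + val j))
        ((List.range M).map g)
      = (List.range M).map (fun h : Nat =>
          if i ≤ (h : Int) ∧ (h : Int) < i + (t : Int) then g h + val ((h : Int) - i) else g h) := by
    intro t
    induction t with
    | zero =>
        intro _
        rw [Nat.cast_zero, PySem.List.pyRange_one_eq_nil (le_refl 0), List.foldl_nil]
        apply List.map_congr_left
        intro k _
        rw [if_neg (by omega)]
    | succ t ih =>
        intro hb
        have hb' : (t : Int) ≤ (M : Int) - i := by push_cast at hb ⊢; omega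
        have hstep : ((t + 1 : Nat) : Int) = (t : Int) + 1 := by push_cast; ring
        rw [hstep, PySem.List.pyRange_one_succ_right (by omega), List.foldl_append, ih hb',
          List.foldl_cons, List.foldl_nil]
        have hget : PySem.List.pyGetD ((List.range M).map (fun h : Nat =>
            if i ≤ (h : Int) ∧ (h : Int) < i + (t : Int) then g h + val ((h : Int) - i) else g h))
            (i + (t : Int)) 0 = g (i + (t : Int)).toNat := by
          rw [pv_getD_map_range_int M _ _ (by omega) (by omega)]
          rw [if_neg (by omega)]
        rw [hget, PySem.List.pySetD_of_nonneg _ _ (by omega),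
          pv_map_range_set M (i + (t : Int)).toNat (by omega)]
        apply List.map_congr_left
        intro k hk
        have hkM : k < M := List.mem_range.mp hk
        by_cases hke : k = (i + (t : Int)).toNat
        · have h2 : ((i + (t : Int)).toNat : Int) = i + (t : Int) := by omega
          rw [if_pos hke, hke, if_pos (by omega)]
          have h3 : ((i + (t : Int)).toNat : Int) - i = (t : Int) := by omega
          rw [h3]
        · rw [if_neg hke]
          by_cases hlt : i ≤ (k : Int) ∧ (k : Int) < i + (t : Int)
          · rw [if_pos hlt, if_pos (by omega)]
          · rw [if_neg hlt, if_neg (by omega)]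
  by_cases hiM : i ≤ (M : Int)
  · have h1 : (M : Int) - i = (((M : Int) - i).toNat : Int) := by omega
    rw [h1, aux ((M : Int) - i).toNat (by omega)]
    apply List.map_congr_left
    intro k hk
    have hkM := List.mem_range.mp hk
    by_cases hik : i ≤ (k : Int)
    · rw [if_pos ⟨hik, by omega⟩, if_pos hik]
    · rw [if_neg (by omega), if_neg hik]
  · rw [PySem.List.pyRange_one_eq_nil (by omega), List.foldl_nil]
    apply List.map_congr_left
    intro k hk
    have := List.mem_range.mp hk
    rw [if_neg (by omega)]

theorem pv_conv_outer (M : Nat) (val : Int → Int → Int) (l : List Int)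
    (hl : ∀ i ∈ l, 0 ≤ i) (g : Nat → Int) :
    l.foldl (fun v i => (PySem.List.pyRange 0 ((M : Int) - i)).foldl (fun w j =>
        PySem.List.pySetD w (i + j) (PySem.List.pyGetD w (i + j) 0 + val i j)) v)
      ((List.range M).map g)
    = (List.range M).map (fun h : Nat =>
        g h + (l.map (fun i => if i ≤ (h : Int) then val i ((h : Int) - i) else 0)).sum) := by
  induction l generalizing g with
  | nil => simp
  | cons a t ih =>
      simp only [List.foldl_cons]
      rw [pv_conv_inner M a (hl a (by simp)) (val a) g,
        ih (fun i hi => hl i (by simp [hi]))]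
      apply List.map_congr_left
      intro h _
      simp only [List.map_cons, List.sum_cons]
      split_ifs with hah <;> ring

theorem pv_init_eq (M : Nat) :
    PySem.List.pySetD (List.replicate M (0 : Int)) 0 1 = (List.range M).map pvE := by
  rw [PySem.List.pySetD_of_nonneg _ _ (by omega)]
  apply List.ext_getElem
  · simp
  · intro i h1 h2
    simp only [List.getElem_set, List.getElem_replicate, List.getElem_map, List.getElem_range, pvE]
    split_ifs <;> simp_all

theorem pv_sum_map_range (n : Nat) (f : Nat → Int) :
    ((List.range n).map f).sum = ∑ i ∈ Finset.range n, f i := by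
  induction n with
  | zero => simp
  | succ n ih => rw [List.range_succ, Finset.sum_range_succ, List.map_append, List.sum_append, ih]; simp

-- the convolution entry at h is the h-th coefficient of the product series
theorem pv_coeff_eq (M h' : Nat) (hh : h' < M) (fL fW : Nat → Int) :
    ((PySem.List.pyRange 0 (M : Int)).map (fun i =>
        if i ≤ (h' : Int) then PySem.List.pyGetD ((List.range M).map fL) i 0 *
          PySem.List.pyGetD ((List.range M).map fW) ((h' : Int) - i) 0 else 0)).sum
    = (PowerSeries.coeff (R := ℤ) h') (PowerSeries.mk fL * PowerSeries.mk fW) := by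
  rw [PySem.List.pyRange_zero_nat M, List.map_map, pv_sum_map_range]
  have hterm : ∀ i ∈ Finset.range M,
      (if ((i : Nat) : Int) ≤ (h' : Int) then PySem.List.pyGetD ((List.range M).map fL) ((i : Nat) : Int) 0 *
        PySem.List.pyGetD ((List.range M).map fW) ((h' : Int) - ((i : Nat) : Int)) 0 else 0)
      = (if i ≤ h' then fL i * fW (h' - i) else 0) := by
    intro i hi
    have hiM : i < M := Finset.mem_range.mp hi
    by_cases hih : i ≤ h'
    · rw [if_pos (by omega : ((i : Nat) : Int) ≤ (h' : Int)), if_pos hih,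
        pv_getD_map_range_int M fL ((i : Nat) : Int) (by omega) (by omega),
        (show (h' : Int) - ((i : Nat) : Int) = (((h' - i : Nat) : Nat) : Int) by omega),
        pv_getD_map_range_int M fW _ (by omega) (by omega)]
      simp
    · rw [if_neg (by omega), if_neg hih]
  rw [show ((fun i : Int =>
        if i ≤ (h' : Int) then PySem.List.pyGetD ((List.range M).map fL) i 0 *
          PySem.List.pyGetD ((List.range M).map fW) ((h' : Int) - i) 0 else 0) ∘
        (fun k : Nat => (k : Int))) = (fun i : Nat =>
        if ((i : Nat) : Int) ≤ (h' : Int) then PySem.List.pyGetD ((List.range M).map fL) ((i : Nat) : Int) 0 *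
          PySem.List.pyGetD ((List.range M).map fW) ((h' : Int) - ((i : Nat) : Int)) 0 else 0) from rfl,
    Finset.sum_congr rfl hterm, PowerSeries.coeff_mul,
    Finset.Nat.sum_antidiagonal_eq_sum_range_succ_mk]
  simp only [PowerSeries.coeff_mk]
  have hsucc : ∀ x ∈ Finset.range h'.succ, fL x * fW (h' - x)
      = if x ≤ h' then fL x * fW (h' - x) else 0 := by
    intro x hx
    rw [if_pos (by simp only [Finset.mem_range] at hx; omega)]
  rw [Finset.sum_congr rfl hsucc]
  exact (Finset.sum_subset
    (by intro x hx; simp only [Finset.mem_range] at *; omega)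
    (by intro x hx hnx; simp only [Finset.mem_range] at hx hnx; rw [if_neg (by omega)])).symm

-- ===== list ↔ function bridges (B side) =====

-- rebuilding the list with g[k] = f[k] + g[k-m] applies the factor 1/(1-x^m)
theorem pv_alt_inner_aux (M : Nat) (m : Int) (hm : 1 ≤ m) (f : Nat → Int) :
    ∀ t : Nat, t ≤ M →
    (PySem.List.pyRange 0 (t : Int)).foldl (fun new k =>
        new ++ [PySem.List.pyGetD ((List.range M).map f) k 0 +
          (if m ≤ k then PySem.List.pyGetD new (k - m) 0 else 0)]) []
    = (List.range t).map (pvLf m.toNat f) := by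
  intro t
  induction t with
  | zero =>
      intro _
      rw [Nat.cast_zero, PySem.List.pyRange_one_eq_nil (le_refl 0), List.foldl_nil]
      rfl
  | succ t ih =>
      intro hb
      have hb' : t ≤ M := by omega
      have hstep : ((t + 1 : Nat) : Int) = (t : Int) + 1 := by push_cast; ring
      rw [hstep, PySem.List.pyRange_one_succ_right (by omega), List.foldl_append, ih hb',
        List.foldl_cons, List.foldl_nil,
        pv_getD_map_range_int M f (t : Int) (by omega) (by omega),
        List.range_succ, List.map_append, List.map_cons, List.map_nil]
      simp only [Int.toNat_natCast]
      by_cases hmt : m ≤ (t : Int)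
      · rw [if_pos hmt,
          pv_getD_map_range_int t (pvLf m.toNat f) ((t : Int) - m) (by omega) (by omega),
          pvLf_high (n := m.toNat) (k := t) f ⟨by omega, by omega⟩]
        have : ((t : Int) - m).toNat = t - m.toNat := by omega
        rw [this]
      · rw [if_neg hmt, pvLf_low f (by omega), add_zero]

theorem pv_alt_inner_bridge (M : Nat) (m : Int) (hm : 1 ≤ m) (f : Nat → Int) :
    (PySem.List.pyRange 0 (M : Int)).foldl (fun new k =>
        new ++ [PySem.List.pyGetD ((List.range M).map f) k 0 +
          (if m ≤ k then PySem.List.pyGetD new (k - m) 0 else 0)]) []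
    = (List.range M).map (pvLf m.toNat f) :=
  pv_alt_inner_aux M m hm f M (le_refl M)

theorem pv_alt_fold (M : Nat) (l : List Int) (hl : ∀ n ∈ l, 1 ≤ n) (f : Nat → Int) :
    l.foldl (fun c m =>
        (PySem.List.pyRange 0 (M : Int)).foldl (fun new k =>
          new ++ [PySem.List.pyGetD c k 0 +
            (if m ≤ k then PySem.List.pyGetD new (k - m) 0 else 0)]) [])
      ((List.range M).map f)
    = (List.range M).map (l.foldl (fun g n => pvLf n.toNat g) f) := by
  induction l generalizing f with
  | nil => rfl
  | cons a t ih =>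
      simp only [List.foldl_cons]
      rw [pv_alt_inner_bridge M a (hl a (by simp)) f, ih (fun n hn => hl n (by simp [hn]))]

-- folding each factor of the doubled multiset once = folding each base factor twice
theorem pv_double_fold (l : List Int) (f : Nat → Int) :
    (l.flatMap (fun m => (PySem.List.pyRange 0 2).map (fun _ => m))).foldl
      (fun g n => pvLf n.toNat g) f
    = l.foldl (fun g n => pvLf n.toNat (pvLf n.toNat g)) f := by
  induction l generalizing f with
  | nil => rfl
  | cons a t ih =>
      have h2 : PySem.List.pyRange 0 2 = [0, 1] := by decide
      rw [List.flatMap_cons, h2, List.foldl_append]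
      simp only [List.map_cons, List.map_nil, List.foldl_cons, List.foldl_nil]
      exact ih (pvLf a.toNat (pvLf a.toNat f))

theorem pv_alt_init (M : Nat) :
    (PySem.List.pyRange 0 (M : Int)).map (fun k => if k == 0 then (1 : Int) else 0)
    = (List.range M).map pvE := by
  rw [PySem.List.pyRange_zero_nat M, List.map_map]
  apply List.map_congr_left
  intro k _
  simp only [Function.comp_apply, beq_iff_eq, pvE]
  by_cases h : k = 0
  · subst h; simp
  · rw [if_neg (by exact_mod_cast h), if_neg h]

-- main list-level equality for max_weight ≥ 2
theorem pv_main (mw : Int) (h2 : 2 ≤ mw) : w3_vacuum_dims mw = w3_vacuum_dims_alt mw := by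
  have hM : mw + 1 = (((mw + 1).toNat : Nat) : Int) := by omega
  set M : Nat := (mw + 1).toNat with hMdef
  have hM3 : 3 ≤ M := by omega
  have hl2 : ∀ n ∈ PySem.List.pyRange 2 (M : Int), (1 : Int) ≤ n := by
    intro n hn; rw [PySem.List.mem_pyRange_one] at hn; omega
  have hl3 : ∀ n ∈ PySem.List.pyRange 3 (M : Int), (1 : Int) ≤ n := by
    intro n hn; rw [PySem.List.mem_pyRange_one] at hn; omega
  have hl0 : ∀ i ∈ PySem.List.pyRange 0 (M : Int), (0 : Int) ≤ i := by
    intro n hn; rw [PySem.List.mem_pyRange_one] at hn; omega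
  have hlf : ∀ n ∈ ([2] ++ (PySem.List.pyRange 3 (M : Int)).flatMap
      (fun m => (PySem.List.pyRange 0 2).map (fun _ => m))), (1 : Int) ≤ n := by
    intro n hn
    rcases List.mem_append.mp hn with h | h
    · simp only [List.mem_singleton] at h; omega
    · rw [List.mem_flatMap] at h
      obtain ⟨m, hm, hnm⟩ := h
      rw [List.mem_map] at hnm
      obtain ⟨_, _, rfl⟩ := hnm
      exact hl3 m hm
  have hrep : List.replicate M (0 : Int) = (List.range M).map (fun _ => (0 : Int)) := by
    simp
  simp only [w3_vacuum_dims, w3_vacuum_dims_alt]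
  rw [hM]
  simp only [Int.toNat_natCast]
  rw [pv_init_eq M,
    pv_outer_bridge M (PySem.List.pyRange 2 (M : Int)) hl2 pvE,
    pv_outer_bridge M (PySem.List.pyRange 3 (M : Int)) hl3 pvE,
    pv_alt_init M,
    pv_alt_fold M ([2] ++ (PySem.List.pyRange 3 (M : Int)).flatMap
      (fun m => (PySem.List.pyRange 0 2).map (fun _ => m))) hlf pvE,
    hrep,
    pv_conv_outer M (fun i j =>
      PySem.List.pyGetD ((List.range M).map
        ((PySem.List.pyRange 2 (M : Int)).foldl (fun g n => pvLf n.toNat g) pvE)) i 0 *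
      PySem.List.pyGetD ((List.range M).map
        ((PySem.List.pyRange 3 (M : Int)).foldl (fun g n => pvLf n.toNat g) pvE)) j 0)
      (PySem.List.pyRange 0 (M : Int)) hl0 (fun _ => 0)]
  have hfac : (([2] : List Int) ++ (PySem.List.pyRange 3 (M : Int)).flatMap
        (fun m => (PySem.List.pyRange 0 2).map (fun _ => m))).foldl
        (fun g (n : Int) => pvLf n.toNat g) pvE
      = (PySem.List.pyRange 3 (M : Int)).foldl
          (fun g (n : Int) => pvLf n.toNat (pvLf n.toNat g)) (pvLf 2 pvE) := by
    rw [List.foldl_append]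
    simp only [List.foldl_cons, List.foldl_nil]
    exact pv_double_fold (PySem.List.pyRange 3 (M : Int)) (pvLf (2 : Int).toNat pvE)
  rw [hfac]
  apply List.map_congr_left
  intro h hh
  rw [PySem.List.mem_pyRange_one] at hh
  simp only [Prod.mk.injEq, true_and]
  rw [pv_getD_map_range_int M _ h hh.1 hh.2, pv_getD_map_range_int M _ h hh.1 hh.2,
    zero_add, pv_coeff_eq M h.toNat (by omega)]
  have := congrFun (pv_sem_main (M : Int) (by omega)) h.toNat
  simpa using this

-- ===== VERDICT (by name: the statements are the Claim_ definitions above) =====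
theorem w3_vacuum_dims_spec : Claim_equal_w3_vacuum_dims := by
  intro mw _ hpre
  unfold Spec_w3_vacuum_dims
  by_cases h2 : 2 ≤ mw
  · exact pv_main mw h2
  · have : mw = 0 ∨ mw = 1 := by unfold Pre_w3_vacuum_dims at hpre; omega
    rcases this with h | h <;> subst h <;> decide
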